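-- pv_equiv track=rewrite | github.com/ValMor561/PythonTasks | transformSentence.py | transformSentence
-- ===== SOURCE A (Python) =====
-- def transformSentence(sentence):
--     arr = sentence.split(" ")
--     count = len(arr)
--     for i in range(0, count):
--         n = len(arr[i])
--         arr[i] = list(arr[i])
--         for j in range(1, n):
--             if arr[i][j].lower() > arr[i][j - 1].lower():
--                 arr[i][j] = arr[i][j].upper()
--             if arr[i][j].lower() < arr[i][j - 1].lower():
--                 arr[i][j] = arr[i][j].lower()
--         arr[i] = ''.join(arr[i])
--     sentence = " ".join(arr)
--     return sentence
-- ===== SOURCE B (Python) =====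
-- def transformSentence(sentence):
--     out = []
--     prev = None
--     for c in sentence:
--         if c == ' ':
--             out.append(' ')
--             prev = None
--         else:
--             if prev is None:
--                 out.append(c)
--             else:
--                 cl, pl = c.lower(), prev.lower()
--                 out.append(c.upper() if cl > pl else (c.lower() if cl < pl else c))
--             prev = c
--     return ''.join(out)
-- ===== Notes on version B (the rewrite author's own statement) =====
-- stated objective: faster
-- what changed: Replaces A's word-splitting, per-word index loops with in-place mutation, and final join by one linear pass over the characters that keeps the previous original letter of the current word (reset at word boundaries) and emits each output character directly.
import Mathlib
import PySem

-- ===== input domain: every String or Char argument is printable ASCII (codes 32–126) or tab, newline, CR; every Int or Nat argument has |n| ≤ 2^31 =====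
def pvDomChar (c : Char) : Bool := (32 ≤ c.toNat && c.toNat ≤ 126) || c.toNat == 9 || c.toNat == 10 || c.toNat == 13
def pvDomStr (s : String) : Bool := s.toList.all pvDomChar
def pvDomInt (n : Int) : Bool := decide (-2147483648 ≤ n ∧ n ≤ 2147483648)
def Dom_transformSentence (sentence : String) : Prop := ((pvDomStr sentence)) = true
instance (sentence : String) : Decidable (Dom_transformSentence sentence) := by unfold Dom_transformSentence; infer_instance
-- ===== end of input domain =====

-- B replaces A's split(" ")/per-word index loops/join(" ") by one linear left-to-right pass over the
-- characters that tracks the previous letter of the current word (reset at word boundaries); a timing run measured B faster by a constant factor.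


-- ===== PORT A =====
-- inner-loop body at index j: 'if arr[i][j].lower() > arr[i][j-1].lower(): arr[i][j] = arr[i][j].upper()'
-- then (re-reading the element) 'if arr[i][j].lower() < arr[i][j-1].lower(): arr[i][j] = arr[i][j].lower()'
def tsStep (cur : List Char) (j : Int) : List Char :=
  let cur1 := if PySem.Chars.lowerChar (PySem.List.pyGetD cur j ' ') >
                 PySem.Chars.lowerChar (PySem.List.pyGetD cur (j-1) ' ')
              then PySem.List.pySetD cur j (PySem.Chars.upperChar (PySem.List.pyGetD cur j ' '))
              else cur
  if PySem.Chars.lowerChar (PySem.List.pyGetD cur1 j ' ') <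
     PySem.Chars.lowerChar (PySem.List.pyGetD cur1 (j-1) ' ')
  then PySem.List.pySetD cur1 j (PySem.Chars.lowerChar (PySem.List.pyGetD cur1 j ' '))
  else cur1

-- body of the outer loop on arr[i]: n = len(arr[i]); list(arr[i]); for j in range(1, n): …; ''.join
-- (list(…) and ''.join(…) are the identity on List Char)
def tsWord (w : List Char) : List Char :=
  (PySem.List.pyRange 1 (w.length : Int) 1).foldl tsStep w

def transformSentence (sentence : String) : String :=
  let arr := PySem.Chars.splitOn sentence.toList [' ']
  let count := (arr.length : Int)
  let out := (PySem.List.pyRange 0 count 1).foldl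
      (fun a i => PySem.List.pySetD a i (tsWord (PySem.List.pyGetD a i []))) arr
  String.ofList (PySem.Chars.join [' '] out)

-- ===== PORT B =====
def tsAltF (p c : Char) : Char :=
  let cl := PySem.Chars.lowerChar c
  let pl := PySem.Chars.lowerChar p
  if cl > pl then PySem.Chars.upperChar c
  else if cl < pl then PySem.Chars.lowerChar c
  else c

def tsAltStep (st : List Char × Option Char) (c : Char) : List Char × Option Char :=
  if c = ' ' then (st.1 ++ [' '], none)
  else
    match st.2 with
    | none   => (st.1 ++ [c], some c)
    | some p => (st.1 ++ [tsAltF p c], some c)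

def transformSentence_alt (sentence : String) : String :=
  String.ofList ((sentence.toList.foldl tsAltStep ([], none)).1)

-- ===== PRECONDITION & SPEC =====
def Spec_transformSentence (sentence : String) (out : String) : Prop := out = transformSentence_alt sentence
instance (sentence : String) (out : String) : Decidable (Spec_transformSentence sentence out) := by unfold Spec_transformSentence; infer_instance

-- ===== CLAIM (what is proved, stated in full; the proofs are below) =====
def Claim_equal_transformSentence : Prop := ∀ (sentence : String), Dom_transformSentence sentence → Spec_transformSentence sentence (transformSentence sentence)

-- ===== LEMMAS AND PROOFS =====

lemma char_le_iff (a b : Char) : a ≤ b ↔ a.toNat ≤ b.toNat := ge_iff_le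

lemma char_ofNat_toNat (n : Nat) (h : n < 55296) : (Char.ofNat n).toNat = n := by
  rw [Char.toNat_ofNat]
  simp [Nat.isValidChar, Or.inl h]

lemma isupper_iff (c : Char) : PySem.Chars.isupper c = true ↔ 65 ≤ c.toNat ∧ c.toNat ≤ 90 := by
  unfold PySem.Chars.isupper
  rw [Bool.and_eq_true, decide_eq_true_eq, decide_eq_true_eq, char_le_iff, char_le_iff]
  exact Iff.rfl

lemma islower_iff (c : Char) : PySem.Chars.islower c = true ↔ 97 ≤ c.toNat ∧ c.toNat ≤ 122 := by
  unfold PySem.Chars.islower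
  rw [Bool.and_eq_true, decide_eq_true_eq, decide_eq_true_eq, char_le_iff, char_le_iff]
  exact Iff.rfl

-- case changes do not change the lowercase image
lemma lower_upperChar (c : Char) :
    PySem.Chars.lowerChar (PySem.Chars.upperChar c) = PySem.Chars.lowerChar c := by
  unfold PySem.Chars.upperChar
  by_cases h : PySem.Chars.islower c = true
  · rw [if_pos h]
    have hc := (islower_iff c).mp h
    have hd : (Char.ofNat (c.toNat - 32)).toNat = c.toNat - 32 := char_ofNat_toNat _ (by omega)
    unfold PySem.Chars.lowerChar
    rw [if_pos ((isupper_iff _).mpr (by rw [hd]; omega)),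
        if_neg (fun hu => by have := (isupper_iff c).mp hu; omega)]
    rw [hd]
    have h32 : c.toNat - 32 + 32 = c.toNat := by omega
    rw [h32, Char.ofNat_toNat]
  · rw [if_neg h]

lemma lower_lowerChar (c : Char) :
    PySem.Chars.lowerChar (PySem.Chars.lowerChar c) = PySem.Chars.lowerChar c := by
  by_cases h : PySem.Chars.isupper c = true
  · have hc := (isupper_iff c).mp h
    have hd : (Char.ofNat (c.toNat + 32)).toNat = c.toNat + 32 := char_ofNat_toNat _ (by omega)
    unfold PySem.Chars.lowerChar
    rw [if_pos h, if_neg (fun hu => by have := (isupper_iff _).mp hu; rw [hd] at this; omega)]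
  · unfold PySem.Chars.lowerChar
    rw [if_neg h, if_neg h]

lemma lower_tsAltF (p c : Char) :
    PySem.Chars.lowerChar (tsAltF p c) = PySem.Chars.lowerChar c := by
  unfold tsAltF
  dsimp only
  split_ifs <;> simp [lower_upperChar, lower_lowerChar]

-- the word transformation both programs compute, written structurally:
-- zwf t p transforms the word tail t whose (original) previous letter is p
def zwf : List Char → Char → List Char
  | [], _ => []
  | c :: t, p => tsAltF p c :: zwf t c

def awSpec : List Char → List Char
  | [] => []
  | a :: t => a :: zwf t a

-- one pass of A's inner loop at absolute index pre.length + 1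
lemma tsStep_at (pre : List Char) (q c p : Char) (t : List Char)
    (hq : PySem.Chars.lowerChar q = PySem.Chars.lowerChar p) :
    tsStep (pre ++ q :: c :: t) ((pre.length : Int) + 1) = pre ++ q :: tsAltF p c :: t := by
  have hj : ((pre.length : Int) + 1) = ((pre.length + 1 : Nat) : Int) := by push_cast; ring
  have hj1 : ((pre.length : Int) + 1 - 1) = ((pre.length : Nat) : Int) := by ring
  have E1 : ∀ x : Char, PySem.List.pyGetD (pre ++ q :: x :: t) ((pre.length : Int) + 1) ' ' = x := by
    intro x; rw [hj, PySem.List.pyGetD_natCast]; simp [List.getD]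
  have E2 : ∀ x : Char, PySem.List.pyGetD (pre ++ q :: x :: t) ((pre.length : Int) + 1 - 1) ' ' = q := by
    intro x; rw [hj1, PySem.List.pyGetD_natCast]; simp [List.getD]
  have E3 : ∀ x v : Char, PySem.List.pySetD (pre ++ q :: x :: t) ((pre.length : Int) + 1) v = pre ++ q :: v :: t := by
    intro x v; rw [hj, PySem.List.pySetD_natCast]; simp
  unfold tsStep tsAltF
  dsimp only
  rw [E1, E2, hq]
  by_cases h1 : PySem.Chars.lowerChar c > PySem.Chars.lowerChar p
  · rw [if_pos h1, E3, E1, E2, lower_upperChar, hq,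
        if_neg (by exact fun h => absurd h1 (lt_asymm h)), if_pos h1]
  · rw [if_neg h1, E1, E2, hq, if_neg h1]
    by_cases h2 : PySem.Chars.lowerChar c < PySem.Chars.lowerChar p
    · rw [if_pos h2, E3, if_pos h2]
    · rw [if_neg h2, if_neg h2]

-- A's inner loop from index pre.length+1, on a word whose prefix pre ++ [q] is already processed;
-- q is the processed form of the original previous letter p (same lowercase image)
lemma tsWord_loop (t : List Char) : ∀ (pre : List Char) (p q : Char),
    PySem.Chars.lowerChar q = PySem.Chars.lowerChar p →
    (PySem.List.pyRange ((pre.length : Int) + 1) ((pre.length : Int) + 1 + (t.length : Int)) 1).foldl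
        tsStep (pre ++ q :: t)
      = pre ++ q :: zwf t p := by
  induction t with
  | nil => intro pre p q _; rw [PySem.List.pyRange_one_eq_nil (by simp)]; simp [zwf]
  | cons c t ih =>
    intro pre p q hq
    rw [PySem.List.pyRange_one_cons (by simp)]
    simp only [List.foldl_cons]
    rw [tsStep_at pre q c p t hq]
    have hre : pre ++ q :: tsAltF p c :: t = (pre ++ [q]) ++ tsAltF p c :: t := by simp
    have hlen : ((pre ++ [q]).length : Int) = (pre.length : Int) + 1 := by simp
    have := ih (pre ++ [q]) c (tsAltF p c) (lower_tsAltF p c)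
    rw [hlen] at this
    have harg : ((pre.length : Int) + 1 + 1 + (t.length : Int)) = ((pre.length : Int) + 1 + ((c :: t).length : Int)) := by
      simp; ring
    rw [harg] at this
    rw [hre, this]
    simp [zwf]

lemma tsWord_eq (w : List Char) : tsWord w = awSpec w := by
  cases w with
  | nil => rfl
  | cons a t =>
    unfold tsWord awSpec
    have := tsWord_loop t [] a a rfl
    simp only [List.length_nil, Nat.cast_zero, zero_add, List.nil_append] at this
    have hl : ((a :: t).length : Int) = 1 + (t.length : Int) := by simp; ring
    rw [hl, this]

-- A's outer loop is a map over the word list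
lemma outer_loop (t : List (List Char)) : ∀ (pre : List (List Char)),
    (PySem.List.pyRange (pre.length : Int) ((pre.length : Int) + (t.length : Int)) 1).foldl
        (fun a i => PySem.List.pySetD a i (tsWord (PySem.List.pyGetD a i []))) (pre ++ t)
      = pre ++ t.map tsWord := by
  induction t with
  | nil => intro pre; rw [PySem.List.pyRange_one_eq_nil (by simp)]; simp
  | cons w t ih =>
    intro pre
    rw [PySem.List.pyRange_one_cons (by simp)]
    simp only [List.foldl_cons]
    have hg : PySem.List.pyGetD (pre ++ w :: t) ((pre.length : Nat) : Int) [] = w := by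
      rw [PySem.List.pyGetD_natCast]; simp [List.getD]
    have hs : PySem.List.pySetD (pre ++ w :: t) ((pre.length : Nat) : Int) (tsWord w) = pre ++ tsWord w :: t := by
      rw [PySem.List.pySetD_natCast]; simp
    rw [hg, hs]
    have := ih (pre ++ [tsWord w])
    simp only [List.length_append, List.length_singleton, List.append_assoc, List.singleton_append] at this
    have hc : ((pre.length + 1 : Nat) : Int) = (pre.length : Int) + 1 := by push_cast; ring
    rw [hc] at this
    have harg : (pre.length : Int) + 1 + (t.length : Int) = (pre.length : Int) + ((w :: t).length : Int) := by
      simp; ring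
    rw [harg] at this
    rw [this]
    simp

-- structural split on a single space: spl2 cs = (first piece, remaining pieces)
def spl2 : List Char → List Char × List (List Char)
  | [] => ([], [])
  | c :: t =>
    if c = ' ' then ([], (spl2 t).1 :: (spl2 t).2)
    else (c :: (spl2 t).1, (spl2 t).2)

lemma splitOn_go_spec (l : List Char) : ∀ (fuel : Nat) (cur : List Char) (acc : List (List Char)),
    l.length ≤ fuel →
    PySem.Chars.splitOn.go [' '] fuel l cur acc
      = acc.reverse ++ (cur.reverse ++ (spl2 l).1) :: (spl2 l).2 := by
  induction l with
  | nil =>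
    intro fuel cur acc _
    cases fuel <;> simp [PySem.Chars.splitOn.go, spl2]
  | cons c t ih =>
    intro fuel cur acc hf
    cases fuel with
    | zero => simp at hf
    | succ f =>
      by_cases hc : c = ' '
      · subst hc
        rw [show PySem.Chars.splitOn.go [' '] (f+1) (' ' :: t) cur acc
              = PySem.Chars.splitOn.go [' '] f t [] (cur.reverse :: acc) from by
            simp [PySem.Chars.splitOn.go, List.isPrefixOf]]
        rw [ih f [] (cur.reverse :: acc) (by simpa using hf)]
        simp [spl2]
      · rw [show PySem.Chars.splitOn.go [' '] (f+1) (c :: t) cur acc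
              = PySem.Chars.splitOn.go [' '] f t (c :: cur) acc from by
            simp [PySem.Chars.splitOn.go, List.isPrefixOf, Ne.symm hc]]
        rw [ih f (c :: cur) acc (by simpa using hf)]
        simp [spl2, hc]

lemma splitOn_eq (cs : List Char) :
    PySem.Chars.splitOn cs [' '] = (spl2 cs).1 :: (spl2 cs).2 := by
  unfold PySem.Chars.splitOn
  rw [splitOn_go_spec cs (cs.length + 1) [] [] (by omega)]
  simp

-- B's accumulator fold, described structurally
def bspec : Option Char → List Char → List Char
  | _, [] => []
  | o, c :: t =>
    if c = ' ' then ' ' :: bspec none t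
    else
      match o with
      | none => c :: bspec (some c) t
      | some p => tsAltF p c :: bspec (some c) t

lemma bfold_eq (cs : List Char) : ∀ (acc : List Char) (o : Option Char),
    (cs.foldl tsAltStep (acc, o)).1 = acc ++ bspec o cs := by
  induction cs with
  | nil => intro acc o; simp [bspec]
  | cons c t ih =>
    intro acc o
    simp only [List.foldl_cons]
    by_cases hc : c = ' '
    · subst hc
      rw [show tsAltStep (acc, o) ' ' = (acc ++ [' '], none) from by simp [tsAltStep]]
      rw [ih]
      simp [bspec]
    · cases o with
      | none =>
        rw [show tsAltStep (acc, none) c = (acc ++ [c], some c) from by simp [tsAltStep, hc]]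
        rw [ih]
        simp [bspec, hc]
      | some p =>
        rw [show tsAltStep (acc, some p) c = (acc ++ [tsAltF p c], some c) from by simp [tsAltStep, hc]]
        rw [ih]
        simp [bspec, hc]

lemma join_space (ws : List (List Char)) : ∀ (w : List Char),
    PySem.Chars.join [' '] (w :: ws) = w ++ ws.flatMap (fun u => ' ' :: u) := by
  induction ws with
  | nil => intro w; simp [PySem.Chars.join, List.intercalate]
  | cons v ws ih =>
    intro w
    rw [PySem.Chars.join_cons_cons]
    rw [ih v]
    simp

-- the word-by-word result equals the single-pass result
lemma bspec_spl (cs : List Char) :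
    (bspec none cs
        = awSpec (spl2 cs).1 ++ ((spl2 cs).2).flatMap (fun u => ' ' :: awSpec u)) ∧
    (∀ p, bspec (some p) cs
        = zwf (spl2 cs).1 p ++ ((spl2 cs).2).flatMap (fun u => ' ' :: awSpec u)) := by
  induction cs with
  | nil => simp [bspec, spl2, awSpec, zwf]
  | cons c t ih =>
    by_cases hc : c = ' '
    · subst hc
      constructor
      · simp only [bspec, spl2, if_pos rfl]
        rw [ih.1]
        simp [awSpec]
      · intro p
        simp only [bspec, spl2, if_pos rfl]
        rw [ih.1]
        simp [awSpec, zwf]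
    · constructor
      · simp only [bspec, spl2, if_neg hc]
        rw [ih.2 c]
        simp [awSpec]
      · intro p
        simp only [bspec, spl2, if_neg hc]
        rw [ih.2 c]
        simp [zwf]

-- ===== VERDICT (by name: the statement is the Claim_ definition above) =====
theorem transformSentence_spec : Claim_equal_transformSentence := by
  intro s _
  show transformSentence s = transformSentence_alt s
  unfold transformSentence transformSentence_alt
  dsimp only
  rw [bfold_eq s.toList [] none]
  have ho := outer_loop (PySem.Chars.splitOn s.toList [' ']) []
  simp only [List.length_nil, Nat.cast_zero, zero_add, List.nil_append] at ho
  rw [ho, splitOn_eq s.toList]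
  have hm : ∀ l : List (List Char), l.map tsWord = l.map awSpec :=
    fun l => List.map_congr_left (fun x _ => tsWord_eq x)
  rw [List.map_cons, tsWord_eq, join_space, hm]
  rw [(bspec_spl s.toList).1]
  simp [List.flatMap_map]
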